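-- pv_equiv track=rewrite | github.com/kakao/pycon2016apac-gawibawibo | 0814/player_xxjjvxb.py | show_me_the_hand
-- ===== SOURCE A (Python) =====
-- def show_me_the_hand(records):
--     sosu = []
--     number = 2
--     iter = (len(records) % 219*2) + 1
--     count = 0
--
--     while True:
--
--         isSosu = True
--
--         for i in sosu:
--             if number % i == 0:
--                 isSosu = False
--                 break
--
--         if isSosu:
--             count += 1
--             sosu.append(number)
--
--             if count == iter:
--                 break
--
--         number += 1
--
--     listChoice = ['gawi', 'bawi', 'bo']
--     number = (number + iter) % 3
--
--     return listChoice[number]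
-- ===== SOURCE B (Python) =====
-- def show_me_the_hand(records):
--     iter = (len(records) % 219 * 2) + 1
--
--     def is_prime(k):
--         d = 2
--         while d * d <= k:
--             if k % d == 0:
--                 return False
--             d += 1
--         return True
--
--     count = 0
--     number = 2
--     while True:
--         if is_prime(number):
--             count += 1
--             if count == iter:
--                 break
--         number += 1
--
--     return ['gawi', 'bawi', 'bo'][(number + iter) % 3]
-- ===== Notes on version B (the rewrite author's own statement) =====
-- stated objective: alternative
-- what changed: B finds the iter-th prime by testing each candidate with a sqrt-bounded trial division (is_prime with d*d <= k) instead of A's dividing by the list of all previously found primes, dropping the accumulated sosu list entirely; the iter expression and the final (number+iter)%3 mapping are unchanged.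
import Mathlib
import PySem

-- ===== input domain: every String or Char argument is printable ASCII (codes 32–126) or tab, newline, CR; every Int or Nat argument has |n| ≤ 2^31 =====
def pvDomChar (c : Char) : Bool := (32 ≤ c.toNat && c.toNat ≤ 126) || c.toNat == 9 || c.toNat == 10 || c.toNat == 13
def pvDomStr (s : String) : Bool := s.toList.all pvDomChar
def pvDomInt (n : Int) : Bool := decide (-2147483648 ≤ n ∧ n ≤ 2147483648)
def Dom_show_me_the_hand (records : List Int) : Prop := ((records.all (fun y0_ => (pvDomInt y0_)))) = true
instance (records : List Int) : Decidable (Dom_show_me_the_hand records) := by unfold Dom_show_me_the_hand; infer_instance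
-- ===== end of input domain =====

-- B replaces A's "divide by every prime found so far" primality test with a √k-bounded
-- trial division, keeping the same iter expression and final (number+iter)%3 mapping
-- (objective: alternative algorithm for the nth-prime search).

-- ===== PORT A =====
-- A's while-True loop; the fuel argument is only a totality guard (one unit per
-- iteration of the while loop; the top-level call supplies ample fuel, the loop
-- runs at most p_437 - 1 = 3040 iterations since iter ≤ 437).
def aLoop (fuel : Nat) (iter : Nat) (count : Nat) (number : Nat) (sosu : List Nat) : Nat :=
  match fuel with
  | 0 => number
  | fuel + 1 =>
    -- for i in sosu: if number % i == 0: isSosu = False; break   (List.all short-circuits)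
    let isSosu := sosu.all (fun i => !(number % i == 0))
    if isSosu then
      if count + 1 == iter then number
      else aLoop fuel iter (count + 1) (number + 1) (sosu ++ [number])
    else aLoop fuel iter count (number + 1) sosu

def show_me_the_hand (records : List Int) : String :=
  let iter := records.length % 219 * 2 + 1
  let number := aLoop 4000 iter 0 2 []
  -- listChoice[(number + iter) % 3]; the index is < 3 so getD never uses the default
  [("gawi" : String), "bawi", "bo"].getD ((number + iter) % 3) "gawi"

-- ===== PORT B =====
-- is_prime: trial division by d = 2, 3, … while d*d ≤ k
def bTrial (k : Nat) (d : Nat) : Bool :=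
  if d * d ≤ k then
    if k % d == 0 then false else bTrial k (d + 1)
  else true
termination_by k + 1 - d
decreasing_by
  have hd : d ≤ k := by
    cases d with
    | zero => omega
    | succ e => calc e + 1 ≤ (e + 1) * (e + 1) := Nat.le_mul_of_pos_left _ (by omega)
                _ ≤ k := by assumption
  omega

def isPrimeB (k : Nat) : Bool := bTrial k 2

-- B's while-True loop; fuel is the same totality guard as in A's port.
def bLoop (fuel : Nat) (iter : Nat) (count : Nat) (number : Nat) : Nat :=
  match fuel with
  | 0 => number
  | fuel + 1 =>
    if isPrimeB number then
      if count + 1 == iter then number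
      else bLoop fuel iter (count + 1) (number + 1)
    else bLoop fuel iter count (number + 1)

def show_me_the_hand_alt (records : List Int) : String :=
  let iter := records.length % 219 * 2 + 1
  let number := bLoop 4000 iter 0 2
  [("gawi" : String), "bawi", "bo"].getD ((number + iter) % 3) "gawi"

-- ===== PRECONDITION & SPEC =====
def Spec_show_me_the_hand (records : List Int) (out : String) : Prop := out = show_me_the_hand_alt records
instance (records : List Int) (out : String) : Decidable (Spec_show_me_the_hand records out) := by unfold Spec_show_me_the_hand; infer_instance

-- ===== CLAIM (what is proved, stated in full; the proofs are below) =====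
def Claim_equal_show_me_the_hand : Prop := ∀ (records : List Int), Dom_show_me_the_hand records → Spec_show_me_the_hand records (show_me_the_hand records)

-- ===== LEMMAS AND PROOFS =====

-- bTrial k d checks exactly: no m ≥ d with m*m ≤ k divides k
lemma bTrial_iff (k d : Nat) : bTrial k d = true ↔ ∀ m, d ≤ m → m * m ≤ k → k % m ≠ 0 := by
  induction d using bTrial.induct (k := k) with
  | case1 d hle heq =>
    rw [bTrial]
    simp only [hle, if_true, heq, if_true]
    constructor
    · intro h; exact absurd h (by simp)
    · intro h; exact absurd (by simpa using heq) (h d le_rfl hle)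
  | case2 d hle heq ih =>
    rw [bTrial]
    simp only [hle, if_true, heq, Bool.false_eq_true, if_false]
    rw [ih]
    constructor
    · intro h m hm hmk
      rcases Nat.eq_or_lt_of_le hm with rfl | hlt
      · simpa using heq
      · exact h m hlt hmk
    · intro h m hm hmk; exact h m (by omega) hmk
  | case3 d hle =>
    rw [bTrial]
    simp only [hle, if_false]
    constructor
    · intro _ m hm hmk
      exact absurd (le_trans (Nat.mul_le_mul hm hm) hmk) hle
    · intro _; trivial

lemma isPrimeB_iff (k : Nat) (hk : 2 ≤ k) : isPrimeB k = true ↔ Nat.Prime k := by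
  rw [isPrimeB, bTrial_iff]
  constructor
  · intro h
    by_contra hnp
    have hp := Nat.minFac_prime (by omega : k ≠ 1)
    have hsq : k.minFac * k.minFac ≤ k := by
      have := Nat.minFac_sq_le_self (by omega : 0 < k) hnp
      simpa [pow_two] using this
    exact h k.minFac hp.two_le hsq (Nat.dvd_iff_mod_eq_zero.1 (Nat.minFac_dvd k))
  · intro hp m hm hmk hmod
    have hdvd : m ∣ k := Nat.dvd_iff_mod_eq_zero.2 hmod
    rcases (hp.eq_one_or_self_of_dvd m hdvd) with rfl | rfl
    · omega
    · nlinarith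

-- A's test against the list of all primes below `number` is the primality of `number`
lemma sosuAll_iff (number : Nat) (h2 : 2 ≤ number) :
    (((List.range number).filter (fun k => decide (Nat.Prime k))).all
      (fun i => !(number % i == 0)) = true) ↔ Nat.Prime number := by
  simp only [List.all_eq_true, List.mem_filter, List.mem_range, decide_eq_true_eq,
    Bool.not_eq_true', beq_eq_false_iff_ne]
  constructor
  · intro h
    by_contra hnp
    have hp := Nat.minFac_prime (by omega : number ≠ 1)
    have hdvd := Nat.minFac_dvd number
    have hlt : number.minFac < number := by
      rcases Nat.lt_or_ge number.minFac number with h' | h'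
      · exact h'
      · have : number.minFac = number :=
          le_antisymm (Nat.le_of_dvd (by omega) hdvd) h'
        exact absurd (this ▸ hp) hnp
    exact h number.minFac ⟨hlt, hp⟩ (Nat.dvd_iff_mod_eq_zero.1 hdvd)
  · intro hp i ⟨hi, hpi⟩ hmod
    have hdvd : i ∣ number := Nat.dvd_iff_mod_eq_zero.2 hmod
    rcases hp.eq_one_or_self_of_dvd i hdvd with rfl | rfl
    · exact absurd rfl hpi.one_lt.ne'
    · omega

-- the two loops march `number` in lockstep; with sosu = the primes below number
-- both primality tests agree, so the loops are equal for every fuel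
lemma loop_eq (iter : Nat) : ∀ (fuel count number : Nat) (sosu : List Nat),
    2 ≤ number →
    sosu = (List.range number).filter (fun k => decide (Nat.Prime k)) →
    aLoop fuel iter count number sosu = bLoop fuel iter count number := by
  intro fuel
  induction fuel with
  | zero => intro _ _ _ _ _; simp [aLoop, bLoop]
  | succ fuel ih =>
    intro count number sosu h2 hs
    rw [aLoop, bLoop]
    have htest : sosu.all (fun i => !(number % i == 0)) = isPrimeB number := by
      rw [Bool.eq_iff_iff, isPrimeB_iff number h2, hs]
      exact sosuAll_iff number h2
    simp only [htest]
    by_cases hp : isPrimeB number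
    · simp only [hp, if_true]
      by_cases hc : count + 1 == iter
      · simp [hc]
      · simp only [hc]
        refine ih (count + 1) (number + 1) (sosu ++ [number]) (by omega) ?_
        have hprime : Nat.Prime number := (isPrimeB_iff number h2).1 hp
        rw [hs, List.range_succ, List.filter_append]
        simp [hprime]
    · simp only [hp]
      refine ih count (number + 1) sosu (by omega) ?_
      have hnp : ¬ Nat.Prime number := fun h => hp ((isPrimeB_iff number h2).2 h)
      rw [hs, List.range_succ, List.filter_append]
      simp [hnp]

-- ===== VERDICT (by name: the statement is the Claim_ definition above) =====
theorem show_me_the_hand_spec : Claim_equal_show_me_the_hand := by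
  intro records _
  unfold Spec_show_me_the_hand show_me_the_hand show_me_the_hand_alt
  simp only [loop_eq _ 4000 0 2 [] (by omega) (by decide)]
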